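-- pv_equiv track=rewrite | github.com/mamorenoc2/HackerRank-Exercises | Interview exercise/dados.py | calcular_puntuacion
-- ===== SOURCE A (Python) =====
-- def calcular_puntuacion(dados):
--     frecuencia = {}
--     for dado in dados:
--         if dado in frecuencia:
--             frecuencia[dado] += 1
--         else:
--             frecuencia[dado] = 1
--
--     puntuacion = 0
--
--     for numero, count in frecuencia.items():
--         if count >= 3:
--             if numero == 1:
--                 puntuacion += 1000
--             else:
--                 puntuacion += (numero * 100)
--
--         if numero == 1:
--             puntuacion += 100
--         elif numero == 5:
--             puntuacion += 50
--
--     return puntuacion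
-- ===== SOURCE B (Python) =====
-- def calcular_puntuacion(dados):
--     # sort-then-scan: walk the sorted dice, peel off each run of equal
--     # values and score it from its run length, instead of building a
--     # frequency dict first
--     xs = sorted(dados)
--     n = len(xs)
--     total = 0
--     i = 0
--     while i < n:
--         v = xs[i]
--         j = i + 1
--         while j < n and xs[j] == v:
--             j += 1
--         if j - i >= 3:
--             total += 1000 if v == 1 else v * 100
--         total += 100 if v == 1 else 50 if v == 5 else 0
--         i = j
--     return total
-- ===== Notes on version B (the rewrite author's own statement) =====
-- stated objective: alternative
-- what changed: Replaces the frequency-dict build plus per-entry scoring loop by sort-then-scan: sort the dice once and walk the sorted list, peeling off each run of equal values and scoring it from its run length (triple bonus if the run has length >= 3, plus the single 1/5 bonus once per run).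
import Mathlib
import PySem

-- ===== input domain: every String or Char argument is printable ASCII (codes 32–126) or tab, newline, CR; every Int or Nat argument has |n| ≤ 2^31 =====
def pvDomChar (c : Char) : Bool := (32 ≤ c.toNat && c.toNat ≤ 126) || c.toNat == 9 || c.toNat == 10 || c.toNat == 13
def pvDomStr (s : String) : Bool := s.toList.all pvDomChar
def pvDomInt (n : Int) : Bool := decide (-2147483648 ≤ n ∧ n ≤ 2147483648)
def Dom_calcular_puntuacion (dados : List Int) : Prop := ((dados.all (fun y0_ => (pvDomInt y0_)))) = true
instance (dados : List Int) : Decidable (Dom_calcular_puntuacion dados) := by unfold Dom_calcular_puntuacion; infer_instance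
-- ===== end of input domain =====

-- B replaces the frequency-dict scoring loop by sort-then-scan over runs of equal values
-- (objective: alternative algorithm of similar cost).

-- ===== PORT A =====
def calcular_puntuacion (dados : List Int) : Int :=
  let frecuencia := dados.foldl (fun d dado =>
      if d.contains dado then d.insert dado (d.getD dado 0 + 1)
      else d.insert dado 1)
    (PySem.Dict.empty : PySem.Dict Int Int)
  frecuencia.items.foldl (fun punt p =>
      let punt1 := if p.2 ≥ 3 then (if p.1 = 1 then punt + 1000 else punt + p.1 * 100) else punt
      if p.1 = 1 then punt1 + 100 else if p.1 = 5 then punt1 + 50 else punt1)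
    0

-- ===== PORT B =====
-- the outer while loop over the sorted list, as tail recursion on the unscanned
-- suffix with the running total; the inner while loop counts the leading run:
-- j - i = 1 + takeWhile length, and advancing i to j drops the head run
def puntuar (total : Int) : List Int → Int
  | [] => total
  | v :: rest =>
      let c : Int := 1 + (rest.takeWhile (fun x => decide (x = v))).length
      let triple := if c ≥ 3 then (if v = 1 then (1000 : Int) else v * 100) else 0
      let simple := if v = 1 then (100 : Int) else if v = 5 then 50 else 0
      puntuar (total + triple + simple) (rest.dropWhile (fun x => decide (x = v)))
  termination_by ys => ys.length
  decreasing_by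
    have := (List.dropWhile_sublist (fun x => decide (x = v)) (l := rest)).length_le
    simp only [List.length_cons]; omega

def calcular_puntuacion_alt (dados : List Int) : Int :=
  puntuar 0 (PySem.List.sorted dados (fun x => x) false)

-- ===== PRECONDITION & SPEC =====
def Spec_calcular_puntuacion (dados : List Int) (out : Int) : Prop := out = calcular_puntuacion_alt dados
instance (dados : List Int) (out : Int) : Decidable (Spec_calcular_puntuacion dados out) := by unfold Spec_calcular_puntuacion; infer_instance

-- ===== CLAIM (what is proved, stated in full; the proofs are below) =====
def Claim_equal_calcular_puntuacion : Prop := ∀ (dados : List Int), Dom_calcular_puntuacion dados → Spec_calcular_puntuacion dados (calcular_puntuacion dados)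

-- ===== LEMMAS AND PROOFS =====

-- per-value score as a function of the value and its multiplicity in the list
def score (l : List Int) (v : Int) : Int :=
  (if l.count v ≥ 3 then (if v = 1 then 1000 else v * 100) else 0)
  + (if v = 1 then 100 else if v = 5 then 50 else 0)

-- sum of score over the distinct values, as a Finset sum
def total (l : List Int) : Int := ∑ v ∈ l.toFinset, score l v

-- A's hand-built frequency dict is Counter(dados)
theorem freq_eq_counter (dados : List Int) :
    dados.foldl (fun d dado =>
      if d.contains dado then d.insert dado (d.getD dado 0 + 1)
      else d.insert dado 1) (PySem.Dict.empty : PySem.Dict Int Int)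
    = PySem.Dict.counter dados := by
  rw [← PySem.Dict.foldl_insert_getD_add_one_eq_counter]
  apply PySem.List.foldl_congr_mem
  intro d x _
  by_cases h : d.contains x
  · simp [h]
  · have : d.getD x 0 = 0 := PySem.Dict.getD_of_not_contains _ _ (by simpa using h)
    simp [h, this]

theorem sum_map_score_nodup (dados : List Int) (L : List Int) (hnd : L.Nodup) :
    (L.map (score dados)).sum = ∑ v ∈ L.toFinset, score dados v := by
  rw [List.sum_toFinset _ hnd]

-- A computes total dados
theorem A_eq_total (dados : List Int) : calcular_puntuacion dados = total dados := by
  unfold calcular_puntuacion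
  simp only [freq_eq_counter, PySem.Dict.items_counter, List.foldl_map]
  have hstep : ∀ (punt v : Int),
      (let punt1 := if ((dados.count v : Int)) ≥ 3 then
          (if v = 1 then punt + 1000 else punt + v * 100) else punt
       if v = 1 then punt1 + 100 else if v = 5 then punt1 + 50 else punt1)
      = punt + score dados v := by
    intro punt v
    simp only [score]
    have hc : ((dados.count v : Int) ≥ 3) ↔ (dados.count v ≥ 3) := by exact_mod_cast Iff.rfl
    split_ifs <;> simp_all <;> omega
  calc (PySem.Set.ofList dados).foldl (fun punt v =>
          let punt1 := if ((dados.count v : Int)) ≥ 3 then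
              (if v = 1 then punt + 1000 else punt + v * 100) else punt
          if v = 1 then punt1 + 100 else if v = 5 then punt1 + 50 else punt1) 0
      = (PySem.Set.ofList dados).foldl (fun punt v => punt + score dados v) 0 := by
        apply PySem.List.foldl_congr_mem; intro acc x _; exact hstep acc x
    _ = 0 + ((PySem.Set.ofList dados).map (score dados)).sum := PySem.List.foldl_add _ _ _
    _ = total dados := by
        rw [zero_add, sum_map_score_nodup _ _ (PySem.Set.nodup_ofList dados)]
        unfold total
        apply Finset.sum_congr _ (fun _ _ => rfl)
        ext x
        simp [PySem.Set.mem_ofList]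

-- on a sorted list, puntuar computes the per-distinct-value score sum
theorem puntuar_eq_total (ys : List Int) (hs : ys.Pairwise (· ≤ ·)) :
    ∀ acc, puntuar acc ys = acc + total ys := by
  induction hn : ys.length using Nat.strong_induction_on generalizing ys with
  | _ n ih =>
    match ys, hs with
    | [], _ => intro acc; simp [puntuar, total]
    | v :: rest, hs =>
      have hsplit : rest = rest.takeWhile (fun x => decide (x = v)) ++
          rest.dropWhile (fun x => decide (x = v)) := (List.takeWhile_append_dropWhile).symm
      set run := rest.takeWhile (fun x => decide (x = v)) with hrun
      set tl := rest.dropWhile (fun x => decide (x = v)) with htl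
      have hrest_le : ∀ x ∈ rest, v ≤ x := by
        intro x hx; exact (List.pairwise_cons.mp hs).1 x hx
      have hrunv : ∀ x ∈ run, x = v := by
        intro x hx
        have := List.mem_takeWhile_imp hx
        simpa using this
      have hstl : tl.Pairwise (· ≤ ·) :=
        List.Pairwise.sublist (List.dropWhile_sublist _) (List.pairwise_cons.mp hs).2
      -- v does not occur in the dropped tail
      have hvtl : v ∉ tl := by
        intro hv
        obtain ⟨w, tl', htl2⟩ : ∃ w tl', tl = w :: tl' := by
          cases h : tl with
          | nil => rw [h] at hv; simp at hv
          | cons a b => exact ⟨a, b, rfl⟩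
        have hw : ¬ (w = v) := by
          have hhd := List.head?_dropWhile_not (p := fun x => decide (x = v)) (l := rest)
          rw [← htl, htl2] at hhd
          simpa using hhd
        rw [htl2] at hv
        rcases List.mem_cons.mp hv with h | h
        · exact hw h.symm
        · have hwle : w ≤ v := by
            rw [htl2] at hstl
            exact (List.pairwise_cons.mp hstl).1 v h
          have hvw : v ≤ w := by
            apply hrest_le
            apply (List.dropWhile_sublist _).mem
            rw [← htl, htl2]; exact List.mem_cons_self
          exact hw (le_antisymm hwle hvw)
      have hlen : tl.length < n := by
        have h1 : tl.length ≤ rest.length := (List.dropWhile_sublist _).length_le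
        simp only [← hn, List.length_cons]; omega
      have ihtl := ih tl.length hlen tl hstl rfl
      -- counts
      have hcv : (v :: rest).count v = 1 + run.length := by
        rw [List.count_cons_self]
        conv_lhs => rw [hsplit]
        rw [List.count_append]
        have h1 : run.count v = run.length :=
          List.count_eq_length.mpr (fun x hx => (hrunv x hx).symm)
        have h2 : tl.count v = 0 := List.count_eq_zero.mpr hvtl
        omega
      have hcw : ∀ w, w ≠ v → (v :: rest).count w = tl.count w := by
        intro w hw
        rw [List.count_cons_of_ne hw.symm]
        conv_lhs => rw [hsplit]
        rw [List.count_append]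
        have : run.count w = 0 := List.count_eq_zero.mpr (fun hx => hw (hrunv w hx))
        omega
      -- score of the list agrees with score of the tail for values of the tail
      have hscore_tl : ∀ w ∈ tl.toFinset, score (v :: rest) w = score tl w := by
        intro w hwmem
        have hw : w ≠ v := fun h => hvtl (h ▸ (List.mem_toFinset.mp hwmem))
        unfold score
        rw [hcw w hw]
      -- toFinset decomposition
      have hfin : (v :: rest).toFinset = insert v tl.toFinset := by
        ext x
        simp only [List.mem_toFinset, List.mem_cons, Finset.mem_insert]
        constructor
        · rintro (h | h)
          · exact Or.inl h
          · rw [hsplit] at h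
            rcases List.mem_append.mp h with h | h
            · exact Or.inl (hrunv x h)
            · exact Or.inr h
        · rintro (h | h)
          · exact Or.inl h
          · refine Or.inr ?_; rw [hsplit]; exact List.mem_append_right _ h
      have hvnot : v ∉ tl.toFinset := fun h => hvtl (List.mem_toFinset.mp h)
      -- unfold one step of puntuar
      intro acc
      rw [puntuar.eq_def]
      simp only [← hrun, ← htl]
      rw [ihtl]
      unfold total
      rw [hfin, Finset.sum_insert hvnot, Finset.sum_congr rfl hscore_tl]
      -- head contribution
      unfold score
      rw [hcv]
      by_cases h3 : (1 : Int) + (run.length : Int) ≥ 3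
      · have h3' : (1 + run.length ≥ 3) := by omega
        simp only [if_pos h3, if_pos h3']; try ring
      · have h3' : ¬ (1 + run.length ≥ 3) := by omega
        simp only [if_neg h3, if_neg h3']; try ring

-- ===== VERDICT (by name: the statement is the Claim_ definition above) =====
theorem calcular_puntuacion_spec : Claim_equal_calcular_puntuacion := by
  intro dados _
  unfold Spec_calcular_puntuacion calcular_puntuacion_alt
  have hperm : (PySem.List.sorted dados (fun x => x) false).Perm dados :=
    PySem.List.sorted_perm dados _ _
  rw [A_eq_total, puntuar_eq_total _ (by simpa using PySem.List.sorted_pairwise dados (fun x => x)) 0, zero_add]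
  unfold total
  have hfin : (PySem.List.sorted dados (fun x => x) false).toFinset = dados.toFinset := by
    ext x; simp [List.mem_toFinset, hperm.mem_iff]
  rw [hfin]
  apply Finset.sum_congr rfl
  intro v _
  unfold score
  rw [hperm.count_eq]
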